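-- pv_equiv track=rewrite | github.com/jonnohuang/cat-ai-factory | repo/tools/run_qc_runner.py | _choose_recommended_action
-- ===== SOURCE A (Python) =====
-- from typing import Any, Dict, List, Optional
--
-- def _choose_recommended_action(
--     failed_actions: List[str],
--     priorities: List[str],
--     fallback_action: str,
-- ) -> str:
--     if not failed_actions:
--         return "proceed_finalize"
--     for action in priorities:
--         if action in failed_actions:
--             return action
--     return fallback_action
-- ===== SOURCE B (Python) =====
-- def _choose_recommended_action(failed_actions, priorities, fallback_action):
--     if not failed_actions:
--         return "proceed_finalize"
--     rank = {}
--     for i, action in enumerate(priorities):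
--         rank.setdefault(action, i)
--     candidates = [rank[a] for a in failed_actions if a in rank]
--     if not candidates:
--         return fallback_action
--     return priorities[min(candidates)]
-- ===== Notes on version B (the rewrite author's own statement) =====
-- stated objective: alternative
-- what changed: B builds a first-index dict over priorities once and picks priorities[min(rank[a] for failed a)], scanning failed_actions against the index instead of scanning priorities with a membership test.
import Mathlib
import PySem

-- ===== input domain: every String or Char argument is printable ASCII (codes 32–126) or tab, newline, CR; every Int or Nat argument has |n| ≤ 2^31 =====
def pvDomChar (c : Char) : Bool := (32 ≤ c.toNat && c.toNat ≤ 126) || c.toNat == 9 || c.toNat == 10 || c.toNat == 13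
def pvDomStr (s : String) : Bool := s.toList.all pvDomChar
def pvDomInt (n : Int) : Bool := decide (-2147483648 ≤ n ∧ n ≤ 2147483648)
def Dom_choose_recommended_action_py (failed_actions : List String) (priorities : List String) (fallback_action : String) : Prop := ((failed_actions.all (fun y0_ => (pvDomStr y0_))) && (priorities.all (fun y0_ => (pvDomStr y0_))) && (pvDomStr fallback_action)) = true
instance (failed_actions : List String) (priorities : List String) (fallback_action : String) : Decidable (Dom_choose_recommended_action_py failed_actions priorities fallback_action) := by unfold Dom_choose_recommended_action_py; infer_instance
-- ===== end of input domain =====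

-- B replaces A's scan of `priorities` with a membership test by a first-index dict over
-- priorities and `priorities[min(candidate ranks)]` (objective: alternative decomposition).

-- ===== PORT A =====
-- `for action in priorities: if action in failed_actions: return action` / `return fallback_action`
def pvALoop (failed_actions : List String) : List String → String → String
  | [], fallback_action => fallback_action
  | action :: rest, fallback_action =>
      if failed_actions.contains action then action else pvALoop failed_actions rest fallback_action

def choose_recommended_action_py (failed_actions : List String) (priorities : List String) (fallback_action : String) : String :=
  if failed_actions = [] then "proceed_finalize"
  else pvALoop failed_actions priorities fallback_action

-- ===== PORT B =====
-- `for i, action in enumerate(priorities): rank.setdefault(action, i)`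
def pvRankLoop : List (Int × String) → PySem.Dict String Int → PySem.Dict String Int
  | [], d => d
  | (i, action) :: rest, d => pvRankLoop rest (d.setdefault action i)

def choose_recommended_action_py_alt (failed_actions : List String) (priorities : List String) (fallback_action : String) : String :=
  if failed_actions = [] then "proceed_finalize"
  else
    let rank := pvRankLoop (PySem.List.enumerate priorities 0) PySem.Dict.empty
    let candidates := failed_actions.filterMap (fun a => rank.get? a)
    match PySem.List.min? candidates (fun x => x) with
    | none => fallback_action
    | some m => (PySem.List.pyGet? priorities m).getD fallback_action  -- index always in range here; getD is a totality guard

-- ===== PRECONDITION & SPEC =====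
def Spec_choose_recommended_action_py (failed_actions : List String) (priorities : List String) (fallback_action : String) (out : String) : Prop := out = choose_recommended_action_py_alt failed_actions priorities fallback_action
instance (failed_actions : List String) (priorities : List String) (fallback_action : String) (out : String) : Decidable (Spec_choose_recommended_action_py failed_actions priorities fallback_action out) := by unfold Spec_choose_recommended_action_py; infer_instance

-- ===== CLAIM (what is proved, stated in full; the proofs are below) =====
def Claim_equal_choose_recommended_action_py : Prop := ∀ (failed_actions : List String) (priorities : List String) (fallback_action : String), Dom_choose_recommended_action_py failed_actions priorities fallback_action → Spec_choose_recommended_action_py failed_actions priorities fallback_action (choose_recommended_action_py failed_actions priorities fallback_action)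

-- ===== LEMMAS AND PROOFS =====

-- first index of `a` in a list (proof-side characterisation of B's rank dict)
def pvFirstIdx (a : String) : List String → Option Nat
  | [] => none
  | p :: rest => if p == a then some 0 else (pvFirstIdx a rest).map (· + 1)

def pvIdxInt (a : String) (pr : List String) : Option Int :=
  Option.map (fun n : Nat => (n : Int)) (pvFirstIdx a pr)

lemma pvIdxInt_cons_self (p : String) (rest : List String) :
    pvIdxInt p (p :: rest) = some 0 := by
  simp [pvIdxInt, pvFirstIdx]

lemma pvIdxInt_cons_of_ne {p a : String} (rest : List String) (hne : p ≠ a) :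
    pvIdxInt a (p :: rest) = (pvIdxInt a rest).map (fun y => y + 1) := by
  simp only [pvIdxInt, pvFirstIdx, beq_eq_false_iff_ne.mpr hne, Bool.false_eq_true, if_false,
    Option.map_map]
  apply Option.map_congr
  intro n _
  simp only [Function.comp_apply]
  push_cast
  ring

lemma pvIdxInt_nonneg {a : String} {pr : List String} {x : Int}
    (h : pvIdxInt a pr = some x) : 0 ≤ x := by
  rcases Option.map_eq_some_iff.mp h with ⟨n, _, rfl⟩
  exact Int.natCast_nonneg n

lemma pvRankLoop_get? (pr : List String) (k : Int) (d : PySem.Dict String Int) (a : String) :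
    (pvRankLoop (PySem.List.enumerate pr k) d).get? a =
      match d.get? a with
      | some v => some v
      | none => (pvIdxInt a pr).map (fun n => k + n) := by
  induction pr generalizing k d with
  | nil =>
    simp only [PySem.List.enumerate_nil, pvRankLoop, pvIdxInt, pvFirstIdx, Option.map_none]
    cases d.get? a <;> rfl
  | cons p rest ih =>
    rw [PySem.List.enumerate_cons]
    show (pvRankLoop (PySem.List.enumerate rest (k+1)) (d.setdefault p k)).get? a = _
    rw [ih]
    by_cases hc : d.contains p = true
    · rw [PySem.Dict.setdefault_of_contains d k hc]
      cases hda : d.get? a with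
      | some v => rfl
      | none =>
        have hne : p ≠ a := by
          rintro rfl
          rw [PySem.Dict.contains_eq_isSome_get?, hda] at hc
          simp at hc
        rw [pvIdxInt_cons_of_ne rest hne]
        simp only [Option.map_map]
        apply Option.map_congr
        intro n _
        simp only [Function.comp_apply]
        ring
    · have hc' : d.contains p = false := by simpa using hc
      rw [PySem.Dict.setdefault_of_not_contains d k hc']
      by_cases hap : a = p
      · subst hap
        have hda : d.get? a = none := (PySem.Dict.get?_eq_none_iff_contains d a).mpr hc'
        rw [PySem.Dict.get?_insert_self, hda, pvIdxInt_cons_self]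
        simp
      · rw [PySem.Dict.get?_insert_of_ne d k hap]
        cases hda : d.get? a with
        | some v => rfl
        | none =>
          rw [pvIdxInt_cons_of_ne rest (fun h => hap h.symm)]
          simp only [Option.map_map]
          apply Option.map_congr
          intro n _
          simp only [Function.comp_apply]
          ring

lemma pvCandidates_eq (fa pr : List String) :
    fa.filterMap (fun a => (pvRankLoop (PySem.List.enumerate pr 0) PySem.Dict.empty).get? a) =
      fa.filterMap (fun a => pvIdxInt a pr) := by
  apply List.filterMap_congr
  intro a _
  rw [pvRankLoop_get?, PySem.Dict.get?_empty]
  show (pvIdxInt a pr).map (fun n => (0:Int) + n) = _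
  have : (fun n : Int => (0:Int) + n) = fun n => n := by funext n; ring
  rw [this, Option.map_id']

lemma pvFoldl_min_map_succ (t : List Int) (x : Int) :
    (t.map (fun y => y + 1)).foldl min (x + 1) = t.foldl min x + 1 := by
  induction t generalizing x with
  | nil => simp
  | cons h tl ih =>
    simp only [List.map_cons, List.foldl_cons]
    rw [min_add_add_right]
    exact ih (min x h)

lemma pvMin?_map_succ (l : List Int) :
    PySem.List.min? (l.map (fun y => y + 1)) (fun x => x) =
      (PySem.List.min? l (fun x => x)).map (fun y => y + 1) := by
  cases l with
  | nil => simp [PySem.List.min?]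
  | cons h t =>
    rw [List.map_cons, PySem.List.min?_id_cons, PySem.List.min?_id_cons]
    simp [pvFoldl_min_map_succ]

lemma pvCand_nonneg (fa pr : List String) (x : Int)
    (hx : x ∈ fa.filterMap (fun a => pvIdxInt a pr)) : 0 ≤ x := by
  rcases List.mem_filterMap.mp hx with ⟨a, _, ha⟩
  exact pvIdxInt_nonneg ha

lemma pvMain (fa : List String) : ∀ (pr : List String) (fb : String),
    pvALoop fa pr fb =
      match PySem.List.min? (fa.filterMap (fun a => pvIdxInt a pr)) (fun x => x) with
      | none => fb
      | some m => (PySem.List.pyGet? pr m).getD fb := by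
  intro pr
  induction pr with
  | nil =>
    intro fb
    simp [pvALoop, pvIdxInt, pvFirstIdx, PySem.List.min?]
  | cons p rest ih =>
    intro fb
    by_cases hp : fa.contains p = true
    · -- A returns p; candidate 0 forces the minimum to be 0
      have h0 : (0 : Int) ∈ fa.filterMap (fun a => pvIdxInt a (p :: rest)) :=
        List.mem_filterMap.mpr ⟨p, by simpa using hp, pvIdxInt_cons_self p rest⟩
      cases hm : PySem.List.min? (fa.filterMap (fun a => pvIdxInt a (p :: rest))) (fun x => x) with
      | none =>
        rw [PySem.List.min?_eq_none_iff] at hm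
        rw [hm] at h0
        simp at h0
      | some m =>
        have hge : 0 ≤ m := pvCand_nonneg _ _ _ (PySem.List.min?_mem hm)
        have hle : m ≤ 0 := PySem.List.min?_isMin hm 0 h0
        have hm0 : m = 0 := le_antisymm hle hge
        subst hm0
        simp only [pvALoop, if_pos hp]
        rw [PySem.List.pyGet?_zero_cons]
        rfl
    · -- p is not failed: both sides reduce to the tail
      have hp' : fa.contains p = false := by simpa using hp
      have hpm : p ∉ fa := by simpa using hp'
      have hcand : fa.filterMap (fun a => pvIdxInt a (p :: rest)) =
          (fa.filterMap (fun a => pvIdxInt a rest)).map (fun y => y + 1) := by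
        rw [List.map_filterMap]
        apply List.filterMap_congr
        intro a ha
        exact pvIdxInt_cons_of_ne rest (fun h => hpm (h ▸ ha))
      rw [hcand, pvMin?_map_succ]
      simp only [pvALoop, hp', Bool.false_eq_true, if_false]
      rw [ih fb]
      cases hm : PySem.List.min? (fa.filterMap (fun a => pvIdxInt a rest)) (fun x => x) with
      | none => rfl
      | some m =>
        have hge : 0 ≤ m := pvCand_nonneg _ _ _ (PySem.List.min?_mem hm)
        simp only [Option.map_some]
        have hidx : PySem.List.pyGet? (p :: rest) (m + 1) = PySem.List.pyGet? rest m := by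
          rw [PySem.List.pyGet?_of_nonneg _ (by omega), PySem.List.pyGet?_of_nonneg _ hge]
          have h1 : (m + 1).toNat = m.toNat + 1 := by omega
          rw [h1]
          simp
        rw [hidx]

-- ===== VERDICT (by name: the statement is the Claim_ definition above) =====
theorem choose_recommended_action_py_spec : Claim_equal_choose_recommended_action_py := by
  intro fa pr fb _
  unfold Spec_choose_recommended_action_py choose_recommended_action_py choose_recommended_action_py_alt
  by_cases h : fa = []
  · simp [h]
  · simp only [if_neg h]
    rw [pvMain fa pr fb, pvCandidates_eq]
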